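-- pv_equiv track=rewrite | github.com/haolunc/ARC-RL | reference_solutions/solutions/880c1354.py | transform
-- ===== SOURCE A (Python) =====
-- def transform(grid: list[list[int]]) -> list[list[int]]:
--     from collections import Counter
--
--     n = len(grid)
--     if n == 0 or len(grid[0]) == 0:
--         return grid
--     m = len(grid[0])
--     h = n // 2
--
--     def quadrant_rep(r0, c0, r1, c1):
--         counts = Counter()
--         for i in range(r0, r1):
--             for j in range(c0, c1):
--                 v = grid[i][j]
--                 if v in (4, 7):
--                     continue
--                 counts[v] += 1
--         if not counts:
--             return None
--
--         maxcount = max(counts.values())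
--         candidates = [k for k, v in counts.items() if v == maxcount]
--         return min(candidates)
--
--     TL = quadrant_rep(0, 0, h, h)
--     TR = quadrant_rep(0, h, 0 + h, m)
--     BL = quadrant_rep(h, 0, n, h)
--     BR = quadrant_rep(h, h, n, m)
--
--     reps = [TL, BL, BR, TR]
--     colors = []
--     for c in reps:
--         if c is not None and c not in colors:
--             colors.append(c)
--
--     if not colors:
--
--         return [row[:] for row in grid]
--
--     mapping = {}
--     k = len(colors)
--     for idx, color in enumerate(colors):
--         mapping[color] = colors[(idx + 1) % k]
--
--     out = []
--     for i in range(n):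
--         new_row = []
--         for j in range(m):
--             v = grid[i][j]
--             new_row.append(mapping.get(v, v))
--         out.append(new_row)
--
--     return out
-- ===== SOURCE B (Python) =====
-- def transform(grid: list[list[int]]) -> list[list[int]]:
--     n = len(grid)
--     if n == 0 or len(grid[0]) == 0:
--         return grid
--     m = len(grid[0])
--     h = n // 2
--
--     def rep(cells):
--         # sort the quadrant's colors, then scan runs: a strictly-longer run takes
--         # over, so the first (smallest) color of maximal multiplicity wins
--         vals = sorted(v for v in cells if v != 4 and v != 7)
--         best, bestc, cur, curc = None, 0, None, 0
--         for v in vals: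
--             curc = curc + 1 if v == cur else 1
--             cur = v
--             if curc > bestc:
--                 best, bestc = cur, curc
--         return best
--
--     top, bottom = grid[:h], grid[h:]
--     TL = rep([v for row in top for v in row[:h]])
--     TR = rep([v for row in top for v in row[h:m]])
--     BL = rep([v for row in bottom for v in row[:h]])
--     BR = rep([v for row in bottom for v in row[h:m]])
--
--     colors = []
--     for c in (TL, BL, BR, TR):
--         if c is not None and c not in colors:
--             colors.append(c)
--     if not colors:
--         return [row[:] for row in grid]
--     k = len(colors)
--
--     def recolor(v):
--         if v in colors:
--             return colors[(colors.index(v) + 1) % k]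
--         return v
--
--     return [[recolor(v) for v in row[:m]] for row in grid]
-- ===== Notes on version B (the rewrite author's own statement) =====
-- stated objective: alternative
-- what changed: B finds each quadrant representative by sorting the quadrant's colors and scanning runs (a strictly longer run takes over, so the smallest most-frequent color wins) instead of A's Counter with max-count then min-over-ties, extracts quadrants by list slicing (grid[:h]/grid[h:], row[:h]/row[h:m]) instead of nested index ranges, and recolors via list membership plus colors.index arithmetic instead of building a mapping dict.
import Mathlib
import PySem

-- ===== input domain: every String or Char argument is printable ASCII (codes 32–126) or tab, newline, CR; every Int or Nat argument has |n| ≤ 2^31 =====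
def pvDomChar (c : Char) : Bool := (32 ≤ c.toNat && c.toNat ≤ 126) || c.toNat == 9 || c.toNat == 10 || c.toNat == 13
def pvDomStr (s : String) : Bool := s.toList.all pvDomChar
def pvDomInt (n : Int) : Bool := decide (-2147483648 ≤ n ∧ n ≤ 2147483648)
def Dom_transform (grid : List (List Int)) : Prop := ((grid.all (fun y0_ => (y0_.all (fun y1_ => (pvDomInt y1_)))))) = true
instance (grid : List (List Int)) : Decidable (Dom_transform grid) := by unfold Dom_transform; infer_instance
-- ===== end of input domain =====

-- B finds each quadrant representative by sorting the quadrant's colors and scanning runs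
-- (a strictly longer run takes over, so the smallest most-frequent color wins) instead of
-- A's Counter with max-count-then-min-over-ties, extracts quadrants by slicing instead of
-- nested index ranges, and recolors via colors.index arithmetic instead of a mapping dict
-- (objective: alternative).

-- ===== PORT A =====
def pvQuadCount (grid : List (List Int)) (r0 c0 r1 c1 : Int) : PySem.Dict Int Int :=
  (PySem.List.pyRange r0 r1 1).foldl (fun cs i =>
    (PySem.List.pyRange c0 c1 1).foldl (fun cs j =>
      let v := PySem.List.pyGetD (PySem.List.pyGetD grid i []) j 0
      if v = 4 ∨ v = 7 then cs else cs.modify v 0 (· + 1)) cs) PySem.Dict.empty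

def pvQuadRep (grid : List (List Int)) (r0 c0 r1 c1 : Int) : Option Int :=
  let counts := pvQuadCount grid r0 c0 r1 c1
  if counts.items = [] then none
  else
    let maxcount := (PySem.List.max? counts.values (fun v => v)).getD 0
    let candidates := (counts.items.filter (fun kv => kv.2 == maxcount)).map Prod.fst
    PySem.List.min? candidates (fun k => k)

def transform (grid : List (List Int)) : List (List Int) :=
  let n := grid.length
  if n = 0 ∨ (grid.headD []).length = 0 then grid
  else
    let m : Int := (grid.headD []).length
    let h : Int := PySem.Int.floordiv (n : Int) 2
    let TL := pvQuadRep grid 0 0 h h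
    let TR := pvQuadRep grid 0 h (0 + h) m
    let BL := pvQuadRep grid h 0 (n : Int) h
    let BR := pvQuadRep grid h h (n : Int) m
    let reps := [TL, BL, BR, TR]
    let colors := reps.foldl (fun acc c =>
      match c with
      | none => acc
      | some c => if c ∈ acc then acc else acc ++ [c]) ([] : List Int)
    if colors = [] then grid.map (fun row => PySem.List.slice row none none)
    else
      let k : Int := colors.length
      let mapping := (PySem.List.enumerate colors).foldl (fun d ic =>
        d.insert ic.2 (PySem.List.pyGetD colors (PySem.Int.mod (ic.1 + 1) k) 0)) PySem.Dict.empty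
      (PySem.List.pyRange 0 (n : Int) 1).map (fun i =>
        (PySem.List.pyRange 0 m 1).map (fun j =>
          let v := PySem.List.pyGetD (PySem.List.pyGetD grid i []) j 0
          mapping.getD v v))

-- ===== PORT B =====
-- Source B's run scan state: (best, bestc, cur, curc)
def pvStepB (st : Option Int × Nat × Option Int × Nat) (v : Int) :
    Option Int × Nat × Option Int × Nat :=
  let curc := if some v = st.2.2.1 then st.2.2.2 + 1 else 1
  if st.2.1 < curc then (some v, curc, some v, curc) else (st.1, st.2.1, some v, curc)

def pvRepB (cells : List Int) : Option Int :=
  let vals := PySem.List.sorted (cells.filter (fun v => decide (v ≠ 4 ∧ v ≠ 7))) (fun v => v) false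
  (vals.foldl pvStepB (none, 0, none, 0)).1

def transform_alt (grid : List (List Int)) : List (List Int) :=
  if grid.length = 0 ∨ (grid.headD []).length = 0 then grid
  else
    let m : Int := (grid.headD []).length
    let h : Int := PySem.Int.floordiv (grid.length : Int) 2
    let top := PySem.List.slice grid none (some h)
    let bottom := PySem.List.slice grid (some h) none
    let TL := pvRepB (top.flatMap (fun row => PySem.List.slice row none (some h)))
    let TR := pvRepB (top.flatMap (fun row => PySem.List.slice row (some h) (some m)))
    let BL := pvRepB (bottom.flatMap (fun row => PySem.List.slice row none (some h)))
    let BR := pvRepB (bottom.flatMap (fun row => PySem.List.slice row (some h) (some m)))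
    let colors := [TL, BL, BR, TR].foldl (fun acc c =>
      match c with
      | none => acc
      | some c => if c ∈ acc then acc else acc ++ [c]) ([] : List Int)
    if colors = [] then grid.map (fun row => PySem.List.slice row none none)
    else
      let k : Int := colors.length
      grid.map (fun row =>
        (PySem.List.slice row none (some m)).map (fun v =>
          if v ∈ colors then
            PySem.List.pyGetD colors
              (PySem.Int.mod ((((PySem.List.index? colors v).getD 0 : Nat) : Int) + 1) k) 0
          else v))

-- ===== PRECONDITION & SPEC =====
-- Pre_ excludes exactly the inputs on which A raises IndexError: some row shorter than the
-- first row, or (first-row width m nonzero and) the quadrant column bound n//2 exceeding m.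
def Pre_transform (grid : List (List Int)) : Prop :=
  (grid.headD []).length = 0 ∨
  (grid.length / 2 ≤ (grid.headD []).length ∧
    ∀ row ∈ grid, (grid.headD []).length ≤ row.length)
instance (grid : List (List Int)) : Decidable (Pre_transform grid) := by
  unfold Pre_transform; infer_instance
def pvWitness_transform : List (List Int) := [[1, 2], [3, 5]]
def Spec_transform (grid : List (List Int)) (out : List (List Int)) : Prop := out = transform_alt grid
instance (grid : List (List Int)) (out : List (List Int)) : Decidable (Spec_transform grid out) := by
  unfold Spec_transform; infer_instance

-- ===== CLAIM (what is proved, stated in full; the proofs are below) =====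
def Claim_equal_transform : Prop := ∀ (grid : List (List Int)), Dom_transform grid → Pre_transform grid → Spec_transform grid (transform grid)

-- ===== LEMMAS AND PROOFS =====

-- proof-side helpers: the common normal form both ports are reduced to
def pvOk (v : Int) : Bool := decide (¬(v = 4 ∨ v = 7))
def pvVal (grid : List (List Int)) (i j : Nat) : Int := (grid.getD i []).getD j 0
def pvCellList (grid : List (List Int)) (rows cols : List Nat) : List Int :=
  (rows.flatMap (fun i => cols.map (fun j => pvVal grid i j))).filter pvOk

def pvRep (d : PySem.Dict Int Int) : Option Int :=
  if d.items = [] then none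
  else (PySem.List.min2? d.items (fun kv => -kv.2) (fun kv => kv.1)).map Prod.fst

def pvRecolor (colors : List Int) (v : Int) : Int :=
  if v ∈ colors then
    PySem.List.pyGetD colors
      (PySem.Int.mod ((((PySem.List.index? colors v).getD 0 : Nat) : Int) + 1)
        ((colors.length : Nat) : Int)) 0
  else v

def pvCommon (grid : List (List Int)) : List (List Int) :=
  let n := grid.length
  let m := (grid.headD []).length
  let h := n / 2
  if m = 0 then grid
  else
    let top := List.range h
    let bot := (List.range (n - h)).map (fun k => h + k)
    let left := List.range h
    let right := (List.range (m - h)).map (fun k => h + k)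
    let TL := pvRep (PySem.Dict.counter (pvCellList grid top left))
    let TR := pvRep (PySem.Dict.counter (pvCellList grid top right))
    let BL := pvRep (PySem.Dict.counter (pvCellList grid bot left))
    let BR := pvRep (PySem.Dict.counter (pvCellList grid bot right))
    let colors := [TL, BL, BR, TR].foldl (fun acc c =>
      match c with
      | none => acc
      | some c => if c ∈ acc then acc else acc ++ [c]) ([] : List Int)
    if colors = [] then grid.map (fun row => PySem.List.slice row none none)
    else
      grid.map (fun row =>
        (List.range m).map (fun (j : Nat) => pvRecolor colors (row.getD j 0)))

-- ---- generic list kit ----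
theorem pvFoldlFoldlFlat {σ α β : Type} (f : σ → β → σ) (g : α → List β) (l : List α) (init : σ) :
    l.foldl (fun s a => (g a).foldl f s) init = (l.flatMap g).foldl f init := by
  induction l generalizing init with
  | nil => rfl
  | cons a l ih => simp [List.foldl_append, ih]

theorem pvEnum {α : Type} (l : List α) (d : α) :
    PySem.List.enumerate l = (List.range l.length).map (fun i : Nat => ((i : Int), l.getD i d)) := by
  apply List.ext_getElem
  · simp [PySem.List.length_enumerate]
  · intro i h1 h2
    simp only [PySem.List.length_enumerate] at h1
    rw [PySem.List.getElem_enumerate, List.getElem_map, List.getElem_range]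
    rw [List.getD_eq_getElem l d h1]
    simp

theorem pvTakeEq {α : Type} (L : List α) (d : α) (c : Nat) (h : c ≤ L.length) :
    L.take c = (List.range c).map (fun j => L.getD j d) := by
  apply List.ext_getElem
  · simp; omega
  · intro i h1 h2
    have hi : i < L.length := by simp at h1; omega
    simp [List.getElem?_eq_getElem hi]

theorem pvDropTakeEq {α : Type} (L : List α) (d : α) (a c : Nat) (h : a + c ≤ L.length) :
    (L.drop a).take c = (List.range c).map (fun j => L.getD (a + j) d) := by
  apply List.ext_getElem
  · simp; omega
  · intro i h1 h2
    have hi : a + i < L.length := by simp at h1; omega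
    simp [List.getElem?_eq_getElem hi]

theorem pvDropEq {α : Type} (L : List α) (d : α) (a : Nat) (h : a ≤ L.length) :
    L.drop a = (List.range (L.length - a)).map (fun k => L.getD (a + k) d) := by
  have := pvDropTakeEq L d a (L.length - a) (by omega)
  rwa [List.take_of_length_le (by simp)] at this

-- ---- min2? characterisation (A's max-then-filter-then-min reduced to one keyed min) ----
def pvLe (p q : Int × Int) : Prop := q.2 < p.2 ∨ (p.2 = q.2 ∧ p.1 ≤ q.1)
def pvPick (m x : Int × Int) : Int × Int :=
  if -x.2 < -m.2 ∨ (¬(-m.2 < -x.2) ∧ x.1 < m.1) then x else m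

theorem pvLe_refl (p : Int × Int) : pvLe p p := by unfold pvLe; omega
theorem pvLe_trans {p q r : Int × Int} (h1 : pvLe p q) (h2 : pvLe q r) : pvLe p r := by
  unfold pvLe at *; omega

theorem pvPickSpec (m x : Int × Int) :
    (pvPick m x = m ∨ pvPick m x = x) ∧ pvLe (pvPick m x) m ∧ pvLe (pvPick m x) x := by
  unfold pvPick
  split_ifs with hc
  · exact ⟨Or.inr rfl, by unfold pvLe; omega, pvLe_refl x⟩
  · exact ⟨Or.inl rfl, pvLe_refl m, by unfold pvLe at *; omega⟩

theorem pvFoldPickSpec (t : List (Int × Int)) (x : Int × Int) :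
    (t.foldl pvPick x = x ∨ t.foldl pvPick x ∈ t) ∧ pvLe (t.foldl pvPick x) x ∧
      ∀ r ∈ t, pvLe (t.foldl pvPick x) r := by
  induction t generalizing x with
  | nil => exact ⟨Or.inl rfl, pvLe_refl x, by simp⟩
  | cons y t ih =>
    obtain ⟨hmem, hle, hall⟩ := ih (pvPick x y)
    obtain ⟨hp, hpx, hpy⟩ := pvPickSpec x y
    refine ⟨?_, ?_, ?_⟩
    · rcases hmem with h | h
      · rcases hp with h' | h'
        · exact Or.inl (by rw [List.foldl_cons, h, h'])
        · exact Or.inr (by rw [List.foldl_cons, h, h']; exact List.mem_cons_self)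
      · exact Or.inr (by rw [List.foldl_cons]; exact List.mem_cons_of_mem y h)
    · exact pvLe_trans hle hpx
    · intro r hr
      rcases List.mem_cons.1 hr with h | h
      · subst h; exact pvLe_trans hle hpy
      · exact hall r h

theorem pvMin2Cons (x : Int × Int) (t : List (Int × Int)) :
    PySem.List.min2? (x :: t) (fun kv => -kv.2) (fun kv => kv.1) = some (t.foldl pvPick x) := by
  induction t generalizing x with
  | nil => rfl
  | cons y t ih =>
    rw [List.foldl_cons, ← ih (pvPick x y)]
    show List.foldl _ _ (x :: y :: t) = List.foldl _ _ (pvPick x y :: t)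
    rw [List.foldl_cons, List.foldl_cons, List.foldl_cons]
    congr 1
    show (if (decide ((-y.2 : Int) < -x.2) || (!decide ((-x.2 : Int) < -y.2) && decide (y.1 < x.1))) = true
        then some y else some x) = some (pvPick x y)
    unfold pvPick
    by_cases hP : ((-y.2 : Int) < -x.2 ∨ (¬((-x.2 : Int) < -y.2) ∧ y.1 < x.1))
    · rw [if_pos (by simpa using hP), if_pos hP]
    · rw [if_neg (by simpa using hP), if_neg hP]

theorem pvMin2Spec (l : List (Int × Int)) (hne : l ≠ []) :
    ∃ p, PySem.List.min2? l (fun kv => -kv.2) (fun kv => kv.1) = some p ∧ p ∈ l ∧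
      ∀ r ∈ l, pvLe p r := by
  cases l with
  | nil => exact absurd rfl hne
  | cons x t =>
    refine ⟨t.foldl pvPick x, ?_, ?_, ?_⟩
    · exact pvMin2Cons x t
    · rcases (pvFoldPickSpec t x).1 with h | h
      · rw [h]; exact List.mem_cons_self
      · exact List.mem_cons_of_mem x h
    · intro r hr
      rcases List.mem_cons.1 hr with h | h
      · rw [h]; exact (pvFoldPickSpec t x).2.1
      · exact (pvFoldPickSpec t x).2.2 r h

-- A's representative computation (max count, then min key among ties) equals a single
-- keyed min on the same association list.
theorem pvMinKeyEq (l : List (Int × Int)) (hne : l ≠ []) :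
    PySem.List.min?
      ((l.filter (fun kv => kv.2 == (PySem.List.max? (l.map Prod.snd) (fun v => v)).getD 0)).map Prod.fst)
      (fun k => k)
    = (PySem.List.min2? l (fun kv => -kv.2) (fun kv => kv.1)).map Prod.fst := by
  obtain ⟨p, hp, hpl, hple⟩ := pvMin2Spec l hne
  obtain ⟨M, hM⟩ : ∃ M, PySem.List.max? (l.map Prod.snd) (fun v => v) = some M := by
    cases h : PySem.List.max? (l.map Prod.snd) (fun v => v) with
    | none => exact absurd ((PySem.List.max?_eq_none_iff _ _).1 h) (by simpa using hne)
    | some M => exact ⟨M, rfl⟩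
  have hMmem : M ∈ l.map Prod.snd := PySem.List.max?_mem hM
  have hMmax : ∀ y ∈ l.map Prod.snd, y ≤ M := PySem.List.max?_isMax hM
  obtain ⟨kv0, hkv0l, hkv0⟩ := List.mem_map.1 hMmem
  rw [hM, hp]
  simp only [Option.getD_some, Option.map_some]
  obtain ⟨x, hx⟩ : ∃ x, PySem.List.min?
      ((l.filter (fun kv => kv.2 == M)).map Prod.fst) (fun k => k) = some x := by
    cases h : PySem.List.min? ((l.filter (fun kv => kv.2 == M)).map Prod.fst) (fun k => k) with
    | none =>
      have := (PySem.List.min?_eq_none_iff _ _).1 h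
      rw [List.map_eq_nil_iff, List.filter_eq_nil_iff] at this
      exact absurd (by simp [hkv0]) (this kv0 hkv0l)
    | some x => exact ⟨x, rfl⟩
  rw [hx]
  have hxmem := PySem.List.min?_mem hx
  have hxmin : ∀ y ∈ (l.filter (fun kv => kv.2 == M)).map Prod.fst, x ≤ y :=
    PySem.List.min?_isMin hx
  obtain ⟨kv1, hkv1, hkv1x⟩ := List.mem_map.1 hxmem
  have hkv1l : kv1 ∈ l := List.mem_of_mem_filter hkv1
  have hkv1M : kv1.2 = M := by simpa using (List.mem_filter.1 hkv1).2
  have hpM : p.2 = M := by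
    have h1 : p.2 ≤ M := hMmax _ (List.mem_map_of_mem hpl)
    have h2 := hple kv0 hkv0l
    unfold pvLe at h2; omega
  have hxp : x ≤ p.1 := hxmin p.1 (List.mem_map_of_mem (List.mem_filter.2 ⟨hpl, by simp [hpM]⟩))
  have hpx : p.1 ≤ x := by
    have := hple kv1 hkv1l
    unfold pvLe at this
    rw [hpM, hkv1M] at this
    omega
  exact congrArg some (le_antisymm hxp hpx)

-- ---- A's counting loops reduced to Dict.counter of a cell list ----
def pvMod (d : PySem.Dict Int Int) (v : Int) : PySem.Dict Int Int := d.insert v (d.getD v 0 + 1)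

theorem pvCountNorm (rows cols : List Nat) (VAL : Nat → Nat → Int) :
    rows.foldl (fun cs i => cols.foldl (fun (cs : PySem.Dict Int Int) j =>
      if VAL i j = 4 ∨ VAL i j = 7 then cs else cs.modify (VAL i j) 0 (· + 1)) cs) PySem.Dict.empty
    = PySem.Dict.counter ((rows.flatMap (fun i => cols.map (VAL i))).filter pvOk) := by
  have hin : ∀ (i : Nat) (cs : PySem.Dict Int Int),
      cols.foldl (fun (cs : PySem.Dict Int Int) j =>
        if VAL i j = 4 ∨ VAL i j = 7 then cs else cs.modify (VAL i j) 0 (· + 1)) cs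
      = ((cols.map (VAL i)).filter pvOk).foldl pvMod cs := by
    intro i cs
    have hflip : (fun (cs : PySem.Dict Int Int) (j : Nat) =>
        if VAL i j = 4 ∨ VAL i j = 7 then cs else cs.modify (VAL i j) 0 (· + 1))
        = (fun (cs : PySem.Dict Int Int) (j : Nat) => if ¬(VAL i j = 4 ∨ VAL i j = 7) then pvMod cs (VAL i j) else cs) := by
      funext cs j
      by_cases hv : VAL i j = 4 ∨ VAL i j = 7 <;> simp [hv, pvMod, PySem.Dict.modify]
    rw [hflip, PySem.List.foldl_ite_eq_foldl_filter, ← List.foldl_map]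
    congr 1
    rw [List.filter_map]
    exact congrArg _ (List.filter_congr (fun j _ => by simp [pvOk]))
  simp only [hin]
  rw [pvFoldlFoldlFlat (f := pvMod) (g := fun i => (cols.map (VAL i)).filter pvOk)]
  rw [← List.filter_flatMap]
  rfl

theorem pvQuadCountEq (grid : List (List Int)) (r0 c0 rc cc : Nat) :
    pvQuadCount grid (r0 : Int) (c0 : Int) ((r0 + rc : Nat) : Int) ((c0 + cc : Nat) : Int)
    = PySem.Dict.counter (pvCellList grid ((List.range rc).map (fun k => r0 + k))
        ((List.range cc).map (fun k => c0 + k))) := by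
  have hrow : PySem.List.pyRange (r0 : Int) ((r0 + rc : Nat) : Int) 1
      = ((List.range rc).map (fun k => r0 + k)).map (fun i : Nat => (i : Int)) := by
    rw [PySem.List.pyRange_one, List.map_map]
    have : (((r0 + rc : Nat) : Int) - (r0 : Int)).toNat = rc := by push_cast; omega
    rw [this]
    apply List.map_congr_left
    intro k _
    simp [Function.comp]
  have hcol : PySem.List.pyRange (c0 : Int) ((c0 + cc : Nat) : Int) 1
      = ((List.range cc).map (fun k => c0 + k)).map (fun j : Nat => (j : Int)) := by
    rw [PySem.List.pyRange_one, List.map_map]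
    have : (((c0 + cc : Nat) : Int) - (c0 : Int)).toNat = cc := by push_cast; omega
    rw [this]
    apply List.map_congr_left
    intro k _
    simp [Function.comp]
  unfold pvQuadCount
  rw [hrow, hcol]
  simp only [List.foldl_map, PySem.List.pyGetD_natCast]
  rw [pvCountNorm (List.range rc) (List.range cc)
    (fun i j => (grid.getD (r0 + i) []).getD (c0 + j) 0)]
  simp [pvCellList, pvVal, List.flatMap_map, List.map_map, Function.comp_def]

theorem pvQuadRepEq (grid : List (List Int)) (r0 c0 rc cc : Nat) :
    pvQuadRep grid (r0 : Int) (c0 : Int) ((r0 + rc : Nat) : Int) ((c0 + cc : Nat) : Int)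
    = pvRep (PySem.Dict.counter (pvCellList grid ((List.range rc).map (fun k => r0 + k))
        ((List.range cc).map (fun k => c0 + k)))) := by
  unfold pvQuadRep pvRep
  rw [pvQuadCountEq grid r0 c0 rc cc]
  by_cases hni : (PySem.Dict.counter (pvCellList grid ((List.range rc).map (fun k => r0 + k))
      ((List.range cc).map (fun k => c0 + k)))).items = []
  · rw [if_pos hni, if_pos hni]
  · rw [if_neg hni, if_neg hni]
    have hv : (PySem.Dict.counter (pvCellList grid ((List.range rc).map (fun k => r0 + k))
        ((List.range cc).map (fun k => c0 + k)))).values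
        = (PySem.Dict.counter (pvCellList grid ((List.range rc).map (fun k => r0 + k))
        ((List.range cc).map (fun k => c0 + k)))).items.map Prod.snd := rfl
    rw [hv]
    exact pvMinKeyEq _ hni

-- ---- colors accumulator is duplicate-free ----
theorem pvColorsNodup (reps : List (Option Int)) (acc : List Int) (h : acc.Nodup) :
    (reps.foldl (fun acc c => match c with
      | none => acc
      | some c => if c ∈ acc then acc else acc ++ [c]) acc).Nodup := by
  induction reps generalizing acc with
  | nil => exact h
  | cons c t ih =>
    rw [List.foldl_cons]
    cases c with
    | none => exact ih acc h
    | some v =>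
      by_cases hv : v ∈ acc
      · simpa [hv] using ih acc h
      · simpa [hv] using ih (acc ++ [v])
          (by simp [List.nodup_append, h]; exact fun a ha he => hv (he ▸ ha))

-- ---- A's (idx+1) % k dict lookup = B's colors.index arithmetic ----
theorem pvMapGetD (colors : List Int) (hnd : colors.Nodup) (v : Int) :
    ((PySem.List.enumerate colors).foldl (fun d ic =>
      d.insert ic.2 (PySem.List.pyGetD colors
        (PySem.Int.mod (ic.1 + 1) ((colors.length : Nat) : Int)) 0)) PySem.Dict.empty).getD v v
    = pvRecolor colors v := by
  have hsnd : List.map (fun ic : Int × Int => ic.2) (PySem.List.enumerate colors) = colors :=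
    PySem.List.map_snd_enumerate colors 0
  have hitems := PySem.Dict.items_foldl_insert_fresh (PySem.List.enumerate colors)
    (fun ic => ic.2)
    (fun ic => PySem.List.pyGetD colors (PySem.Int.mod (ic.1 + 1) ((colors.length : Nat) : Int)) 0)
    PySem.Dict.empty
    (fun a _ => PySem.Dict.contains_empty _)
    (by rw [hsnd]; exact hnd)
  have hkeys : ((PySem.List.enumerate colors).foldl (fun d ic =>
      d.insert ic.2 (PySem.List.pyGetD colors
        (PySem.Int.mod (ic.1 + 1) ((colors.length : Nat) : Int)) 0)) PySem.Dict.empty).keys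
      = colors := by
    show (((PySem.List.enumerate colors).foldl _ PySem.Dict.empty).items.map Prod.fst) = colors
    rw [hitems]
    have h0 : (PySem.Dict.empty : PySem.Dict Int Int).items = [] := rfl
    rw [h0, List.nil_append, List.map_map]
    exact hsnd
  by_cases hv : v ∈ colors
  · obtain ⟨i, hi⟩ : ∃ i, PySem.List.index? colors v = some i := by
      cases h : PySem.List.index? colors v with
      | none =>
        exact absurd hv ((PySem.List.index?_eq_none_iff colors v).1 h)
      | some i => exact ⟨i, rfl⟩
    obtain ⟨hilt, hieq, _⟩ := PySem.List.getElem_of_index?_eq_some hi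
    have hentry : (((i : Nat) : Int), v) ∈ PySem.List.enumerate colors := by
      rw [pvEnum colors 0]
      refine List.mem_map.2 ⟨i, List.mem_range.2 hilt, ?_⟩
      show ((i : Int), colors.getD i 0) = ((i : Int), v)
      rw [List.getD_eq_getElem colors 0 hilt, hieq]
    have hmemit : (v, PySem.List.pyGetD colors
        (PySem.Int.mod (((i : Nat) : Int) + 1) ((colors.length : Nat) : Int)) 0)
        ∈ (((PySem.List.enumerate colors).foldl (fun d ic =>
          d.insert ic.2 (PySem.List.pyGetD colors
            (PySem.Int.mod (ic.1 + 1) ((colors.length : Nat) : Int)) 0)) PySem.Dict.empty)).items := by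
      rw [hitems]
      have h0 : (PySem.Dict.empty : PySem.Dict Int Int).items = [] := rfl
      rw [h0, List.nil_append]
      exact List.mem_map_of_mem hentry
    rw [PySem.Dict.getD_of_mem_items _ hmemit (by rw [hkeys]; exact hnd)]
    unfold pvRecolor
    rw [if_pos hv, hi]
    rfl
  · have hcon : (((PySem.List.enumerate colors).foldl (fun d ic =>
        d.insert ic.2 (PySem.List.pyGetD colors
          (PySem.Int.mod (ic.1 + 1) ((colors.length : Nat) : Int)) 0)) PySem.Dict.empty)).contains v
        = false := by
      rw [PySem.Dict.contains_eq_decide_mem_keys, hkeys]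
      simpa using hv
    rw [PySem.Dict.getD_of_not_contains _ _ hcon]
    unfold pvRecolor
    rw [if_neg hv]

-- ---- A's output pass ----
theorem pvOutEq (grid : List (List Int)) (m : Nat) (mp : PySem.Dict Int Int) :
    (PySem.List.pyRange 0 (grid.length : Int) 1).map (fun i =>
      (PySem.List.pyRange 0 (m : Int) 1).map (fun j =>
        mp.getD (PySem.List.pyGetD (PySem.List.pyGetD grid i []) j 0)
          (PySem.List.pyGetD (PySem.List.pyGetD grid i []) j 0)))
    = grid.map (fun row => (List.range m).map (fun (j : Nat) =>
        mp.getD (PySem.List.pyGetD row (j : Int) 0) (PySem.List.pyGetD row (j : Int) 0))) := by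
  rw [PySem.List.pyRange_zero_nat, PySem.List.pyRange_zero_nat, List.map_map]
  apply List.ext_getElem
  · simp
  · intro i hi1 hi2
    have hilen : i < grid.length := by simpa using hi2
    simp only [Function.comp_def, List.getElem_map, List.getElem_range]
    rw [List.map_map]
    simp [Function.comp_def, List.getElem?_eq_getElem hilen]

theorem pvNotTrivial (grid : List (List Int)) (hm : (grid.headD []).length ≠ 0) :
    ¬(grid.length = 0 ∨ (grid.headD []).length = 0) := by
  rintro (h | h)
  · exact hm (by rw [List.length_eq_zero_iff.1 h]; rfl)
  · exact hm h

-- ---- the tail shared by both reductions ----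
theorem pvTailA (grid : List (List Int)) (m : Nat) (colors : List Int) (hnd : colors.Nodup) :
    (if colors = [] then grid.map (fun row => PySem.List.slice row none none)
     else
       (PySem.List.pyRange 0 (grid.length : Int) 1).map (fun i =>
         (PySem.List.pyRange 0 (m : Int) 1).map (fun j =>
           ((PySem.List.enumerate colors).foldl (fun d ic =>
             d.insert ic.2 (PySem.List.pyGetD colors
               (PySem.Int.mod (ic.1 + 1) ((colors.length : Nat) : Int)) 0)) PySem.Dict.empty).getD
             (PySem.List.pyGetD (PySem.List.pyGetD grid i []) j 0)
             (PySem.List.pyGetD (PySem.List.pyGetD grid i []) j 0))))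
    = (if colors = [] then grid.map (fun row => PySem.List.slice row none none)
       else grid.map (fun row =>
         (List.range m).map (fun (j : Nat) => pvRecolor colors (row.getD j 0)))) := by
  by_cases hcol : colors = []
  · rw [if_pos hcol, if_pos hcol]
  · rw [if_neg hcol, if_neg hcol, pvOutEq grid m _]
    apply List.map_congr_left
    intro row _
    apply List.map_congr_left
    intro j _
    rw [pvMapGetD colors hnd _, PySem.List.pyGetD_natCast]

-- ---- A reduced to the normal form ----
theorem transformA_eq (grid : List (List Int)) (hm : (grid.headD []).length ≠ 0)
    (hh : grid.length / 2 ≤ (grid.headD []).length) :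
    transform grid = pvCommon grid := by
  have hc := pvNotTrivial grid hm
  have hH : PySem.Int.floordiv (grid.length : Int) 2 = ((grid.length / 2 : Nat) : Int) := by
    exact_mod_cast PySem.Int.floordiv_natCast grid.length 2
  have e1 : pvQuadRep grid 0 0 ((grid.length / 2 : Nat) : Int) ((grid.length / 2 : Nat) : Int)
      = pvRep (PySem.Dict.counter (pvCellList grid (List.range (grid.length / 2))
          (List.range (grid.length / 2)))) := by
    have := pvQuadRepEq grid 0 0 (grid.length / 2) (grid.length / 2)
    simpa using this
  have e2 : pvQuadRep grid 0 ((grid.length / 2 : Nat) : Int) ((grid.length / 2 : Nat) : Int)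
        (((grid.headD []).length : Nat) : Int)
      = pvRep (PySem.Dict.counter (pvCellList grid (List.range (grid.length / 2))
          ((List.range ((grid.headD []).length - grid.length / 2)).map (fun k => grid.length / 2 + k)))) := by
    have := pvQuadRepEq grid 0 (grid.length / 2) (grid.length / 2)
      ((grid.headD []).length - grid.length / 2)
    rw [show grid.length / 2 + ((grid.headD []).length - grid.length / 2) = (grid.headD []).length
      from by omega] at this
    simpa using this
  have e3 : pvQuadRep grid ((grid.length / 2 : Nat) : Int) 0 ((grid.length : Nat) : Int)
        ((grid.length / 2 : Nat) : Int)
      = pvRep (PySem.Dict.counter (pvCellList grid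
          ((List.range (grid.length - grid.length / 2)).map (fun k => grid.length / 2 + k))
          (List.range (grid.length / 2)))) := by
    have := pvQuadRepEq grid (grid.length / 2) 0 (grid.length - grid.length / 2) (grid.length / 2)
    rw [show grid.length / 2 + (grid.length - grid.length / 2) = grid.length from by omega] at this
    simpa using this
  have e4 : pvQuadRep grid ((grid.length / 2 : Nat) : Int) ((grid.length / 2 : Nat) : Int)
        ((grid.length : Nat) : Int) (((grid.headD []).length : Nat) : Int)
      = pvRep (PySem.Dict.counter (pvCellList grid
          ((List.range (grid.length - grid.length / 2)).map (fun k => grid.length / 2 + k))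
          ((List.range ((grid.headD []).length - grid.length / 2)).map (fun k => grid.length / 2 + k)))) := by
    have := pvQuadRepEq grid (grid.length / 2) (grid.length / 2) (grid.length - grid.length / 2)
      ((grid.headD []).length - grid.length / 2)
    rw [show grid.length / 2 + (grid.length - grid.length / 2) = grid.length from by omega,
      show grid.length / 2 + ((grid.headD []).length - grid.length / 2) = (grid.headD []).length
        from by omega] at this
    simpa using this
  simp only [transform, if_neg hc, hH, zero_add, e1, e2, e3, e4]
  simp only [pvCommon, if_neg hm]
  exact pvTailA grid _ _ (pvColorsNodup _ _ List.nodup_nil)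

-- ===== B-side lemmas =====

-- run-scan closed forms
theorem pvStepB_same (b : Option Int) (c t : Nat) (a : Int) :
    pvStepB (b, c, some a, t) a
    = if c < t + 1 then (some a, t + 1, some a, t + 1) else (b, c, some a, t + 1) := by
  simp [pvStepB]

theorem pvStepB_new (b : Option Int) (c : Nat) (cur0 : Option Int) (k0 : Nat) (a : Int)
    (hcur : cur0 ≠ some a) :
    pvStepB (b, c, cur0, k0) a
    = if c < 1 then (some a, 1, some a, 1) else (b, c, some a, 1) := by
  simp only [pvStepB, if_neg (show ¬ some a = cur0 from fun h => hcur h.symm)]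

theorem pvRunConst (k : Nat) (b : Option Int) (c t : Nat) (a : Int) (ht : t ≤ c) :
    (List.replicate k a).foldl pvStepB (b, c, some a, t)
    = (if c < t + k then some a else b, max c (t + k), some a, t + k) := by
  induction k generalizing b c t with
  | zero =>
    rw [List.replicate_zero, List.foldl_nil, if_neg (by omega), Nat.add_zero,
      Nat.max_eq_left ht]
  | succ k ih =>
    rw [List.replicate_succ, List.foldl_cons, pvStepB_same]
    by_cases hc : c < t + 1
    · rw [if_pos hc, ih (some a) (t + 1) (t + 1) le_rfl]
      have hceq : t = c := by omega
      subst hceq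
      have h1 : (if t + 1 < t + 1 + k then some a else some a) = some a := by
        split_ifs <;> rfl
      rw [h1, if_pos (by omega : t < t + (k + 1))]
      have h2 : max (t + 1) (t + 1 + k) = max t (t + (k + 1)) := by omega
      have h3 : t + 1 + k = t + (k + 1) := by omega
      rw [h2, h3]
    · rw [if_neg hc, ih b c (t + 1) (by omega)]
      have h1 : t + 1 + k = t + (k + 1) := by omega
      rw [h1]

theorem pvRunEnter (k : Nat) (hk : 0 < k) (b : Option Int) (c : Nat) (cur0 : Option Int)
    (k0 : Nat) (a : Int) (hcur : cur0 ≠ some a) :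
    (List.replicate k a).foldl pvStepB (b, c, cur0, k0)
    = (if c < k then some a else b, max c k, some a, k) := by
  obtain ⟨k', rfl⟩ : ∃ k', k = k' + 1 := ⟨k - 1, by omega⟩
  rw [List.replicate_succ, List.foldl_cons, pvStepB_new b c cur0 k0 a hcur]
  by_cases hc : c < 1
  · rw [if_pos hc, pvRunConst k' (some a) 1 1 a le_rfl]
    have hc0 : c = 0 := by omega
    subst hc0
    have h1 : (if 1 < 1 + k' then some a else some a) = some a := by split_ifs <;> rfl
    rw [h1, if_pos (by omega : 0 < k' + 1)]
    have h2 : max 1 (1 + k') = max 0 (k' + 1) := by omega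
    have h3 : 1 + k' = k' + 1 := by omega
    rw [h2, h3]
  · rw [if_neg hc, pvRunConst k' b c 1 a (by omega)]
    have h3 : 1 + k' = k' + 1 := by omega
    rw [h3]

-- the run scan on a sorted list finds the smallest value of maximal multiplicity
theorem pvDropWhileGt (a : Int) : ∀ (l : List Int), (∀ x ∈ l, a ≤ x) → l.Pairwise (· ≤ ·) →
    ∀ x ∈ l.dropWhile (fun x => decide (x = a)), a < x := by
  intro l
  induction l with
  | nil => simp
  | cons b t ih =>
    intro hle hsort x hx
    by_cases hb : b = a
    · rw [List.dropWhile_cons_of_pos (by simp [hb])] at hx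
      exact ih (fun y hy => hle y (List.mem_cons_of_mem b hy)) (List.pairwise_cons.1 hsort).2 x hx
    · rw [List.dropWhile_cons_of_neg (by simp [hb])] at hx
      have hab : a < b := lt_of_le_of_ne (hle b List.mem_cons_self) (fun h => hb h.symm)
      rcases List.mem_cons.1 hx with rfl | hx
      · exact hab
      · exact lt_of_lt_of_le hab ((List.pairwise_cons.1 hsort).1 x hx)

theorem pvRunMain : ∀ (N : Nat) (L : List Int), L.length ≤ N → L.Pairwise (· ≤ ·) →
    ∀ (b0 : Option Int) (c0 : Nat) (cur0 : Option Int) (k0 : Nat),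
    (∀ x ∈ L, cur0 ≠ some x) → k0 ≤ c0 →
    ((∀ x ∈ L, L.count x ≤ c0) →
        (L.foldl pvStepB (b0, c0, cur0, k0)).1 = b0 ∧
        (L.foldl pvStepB (b0, c0, cur0, k0)).2.1 = c0) ∧
    (∀ y ∈ L, c0 < L.count y →
        ∃ a, a ∈ L ∧ (L.foldl pvStepB (b0, c0, cur0, k0)).1 = some a ∧
          (L.foldl pvStepB (b0, c0, cur0, k0)).2.1 = L.count a ∧ c0 < L.count a ∧
          (∀ x ∈ L, L.count x ≤ L.count a) ∧
          (∀ x ∈ L, L.count x = L.count a → a ≤ x)) := by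
  intro N
  induction N with
  | zero =>
    intro L hlen _ b0 c0 cur0 k0 _ _
    have hnil : L = [] := List.eq_nil_of_length_eq_zero (Nat.le_zero.1 hlen)
    subst hnil
    exact ⟨fun _ => ⟨rfl, rfl⟩, fun y hy => absurd hy (by simp)⟩
  | succ N ih =>
    intro L hlen hsort b0 c0 cur0 k0 hcur hk
    cases L with
    | nil => exact ⟨fun _ => ⟨rfl, rfl⟩, fun y hy => absurd hy (by simp)⟩
    | cons a L' =>
      have hpa : (fun x => decide (x = a)) a = true := by simp
      have htwcons : (a :: L').takeWhile (fun x => decide (x = a))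
          = a :: L'.takeWhile (fun x => decide (x = a)) := List.takeWhile_cons_of_pos hpa
      have hk1 : 0 < ((a :: L').takeWhile (fun x => decide (x = a))).length := by
        rw [htwcons]; simp
      have htwrep : (a :: L').takeWhile (fun x => decide (x = a))
          = List.replicate ((a :: L').takeWhile (fun x => decide (x = a))).length a :=
        List.eq_replicate_of_mem (fun b hb => by
          have := List.mem_takeWhile_imp hb; simpa using this)
      have hLrw : a :: L' = List.replicate ((a :: L').takeWhile (fun x => decide (x = a))).length a
          ++ (a :: L').dropWhile (fun x => decide (x = a)) := by
        conv_lhs => rw [← List.takeWhile_append_dropWhile (p := fun x => decide (x = a)) (l := a :: L')]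
        rw [← htwrep]
      have hale : ∀ x ∈ a :: L', a ≤ x := by
        intro x hx
        rcases List.mem_cons.1 hx with rfl | hx
        · exact le_refl x
        · exact (List.pairwise_cons.1 hsort).1 x hx
      have hdwgt0 : ∀ x ∈ (a :: L').dropWhile (fun x => decide (x = a)), a < x :=
        pvDropWhileGt a (a :: L') hale hsort
      generalize hkdef : ((a :: L').takeWhile (fun x => decide (x = a))).length = k at hk1 hLrw
      generalize hdwdef : (a :: L').dropWhile (fun x => decide (x = a)) = dw at hLrw hdwgt0
      have hdwsub : dw.Sublist (a :: L') := hdwdef ▸ List.dropWhile_sublist _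
      have hdwsort : dw.Pairwise (· ≤ ·) := hsort.sublist hdwsub
      have hmemdw : ∀ x ∈ dw, x ∈ a :: L' := fun x hx => hdwsub.mem hx
      have hadw : dw.count a = 0 := by
        rw [List.count_eq_zero]
        exact fun ha => lt_irrefl a (hdwgt0 a ha)
      have hcnt : ∀ x, (a :: L').count x = (if x = a then k else 0) + dw.count x := by
        intro x
        rw [hLrw, List.count_append, List.count_replicate]
        by_cases hxa : x = a
        · simp [hxa]
        · have hax : ¬ a = x := fun h => hxa h.symm
          simp [hxa, hax]
      have hca : (a :: L').count a = k := by rw [hcnt a]; simp [hadw]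
      have hcx : ∀ x ∈ dw, (a :: L').count x = dw.count x := by
        intro x hx
        have hxa : ¬ x = a := by
          intro h
          exact absurd (h ▸ hdwgt0 x hx) (lt_irrefl a)
        rw [hcnt x, if_neg hxa, Nat.zero_add]
      have hmemL : ∀ x ∈ (a :: L'), x = a ∨ x ∈ dw := by
        intro x hx
        rw [hLrw] at hx
        rcases List.mem_append.1 hx with h | h
        · exact Or.inl (List.eq_of_mem_replicate h)
        · exact Or.inr h
      have hfold : (a :: L').foldl pvStepB (b0, c0, cur0, k0)
          = dw.foldl pvStepB ((if c0 < k then some a else b0), max c0 k, some a, k) := by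
        conv_lhs => rw [hLrw]
        rw [List.foldl_append, pvRunEnter k hk1 b0 c0 cur0 k0 a (hcur a List.mem_cons_self)]
      have hdwlen : dw.length ≤ N := by
        have h1 := congrArg List.length hLrw
        simp only [List.length_append, List.length_replicate, List.length_cons] at h1
        simp only [List.length_cons] at hlen
        omega
      obtain ⟨IH1, IH2⟩ := ih dw hdwlen hdwsort (if c0 < k then some a else b0) (max c0 k)
        (some a) k
        (fun x hx h => absurd (Option.some.inj h ▸ hdwgt0 x hx) (lt_irrefl a))
        (le_max_right _ _)
      constructor
      · -- no value exceeds c0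
        intro hall
        have hklec : k ≤ c0 := hca ▸ hall a List.mem_cons_self
        have hb1 : (if c0 < k then some a else b0) = b0 := if_neg (by omega)
        have hc1 : max c0 k = c0 := Nat.max_eq_left hklec
        have hres := IH1 (fun x hx => by
          have h1 : dw.count x ≤ c0 := by rw [← hcx x hx]; exact hall x (hmemdw x hx)
          exact le_trans h1 (le_max_left _ _))
        rw [hb1, hc1] at hres
        rw [hfold, hb1, hc1]
        exact hres
      · intro y hy hcy
        by_cases Hdw : ∀ x ∈ dw, dw.count x ≤ max c0 k
        · -- the first run wins
          obtain ⟨h1, h2⟩ := IH1 Hdw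
          have hkgt : c0 < k := by
            rcases hmemL y hy with rfl | hydw
            · rwa [hca] at hcy
            · by_cases hck : c0 < k
              · exact hck
              · exfalso
                have hx1 := Hdw y hydw
                rw [Nat.max_eq_left (by omega)] at hx1
                rw [hcx y hydw] at hcy
                omega
          have hb1 : (if c0 < k then some a else b0) = some a := if_pos hkgt
          have hc1 : max c0 k = k := Nat.max_eq_right (le_of_lt hkgt)
          rw [hb1, hc1] at h1 h2
          refine ⟨a, List.mem_cons_self, ?_, ?_, ?_, ?_, ?_⟩
          · rw [hfold, hb1, hc1]; exact h1
          · rw [hfold, hb1, hc1, hca]; exact h2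
          · rwa [hca]
          · intro x hx
            rcases hmemL x hx with rfl | hxdw
            · exact le_refl _
            · rw [hca, hcx x hxdw]
              have := Hdw x hxdw
              rw [hc1] at this
              exact this
          · intro x hx _
            rcases hmemL x hx with rfl | hxdw
            · exact le_refl x
            · exact le_of_lt (hdwgt0 x hxdw)
        · -- a later run wins inside dw
          push_neg at Hdw
          obtain ⟨y', hy'dw, hy'c⟩ := Hdw
          obtain ⟨w, hwdw, hw1, hw2, hwc, hwmax, hwtie⟩ := IH2 y' hy'dw hy'c
          refine ⟨w, hmemdw w hwdw, ?_, ?_, ?_, ?_, ?_⟩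
          · rw [hfold]; exact hw1
          · rw [hfold, hcx w hwdw]; exact hw2
          · have : c0 ≤ max c0 k := le_max_left _ _
            rw [hcx w hwdw]; omega
          · intro x hx
            rcases hmemL x hx with rfl | hxdw
            · rw [hca, hcx w hwdw]
              have : k ≤ max c0 k := le_max_right _ _
              omega
            · rw [hcx x hxdw, hcx w hwdw]; exact hwmax x hxdw
          · intro x hx hxc
            rcases hmemL x hx with rfl | hxdw
            · exfalso
              rw [hca, hcx w hwdw] at hxc
              have : k ≤ max c0 k := le_max_right _ _
              omega
            · rw [hcx x hxdw, hcx w hwdw] at hxc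
              exact hwtie x hxdw hxc

-- B's rep on a cell list equals A's rep on the counter of the filtered cell list
theorem pvRepB_eq (L : List Int) :
    pvRepB L = pvRep (PySem.Dict.counter (L.filter pvOk)) := by
  have hfeq : L.filter (fun v => decide (v ≠ 4 ∧ v ≠ 7)) = L.filter pvOk :=
    List.filter_congr (fun v _ => by
      by_cases h4 : v = 4 <;> by_cases h7 : v = 7 <;> simp [pvOk, h4, h7])
  unfold pvRepB
  rw [hfeq]
  by_cases hFnil : L.filter pvOk = []
  · rw [hFnil]; rfl
  · have hSperm : (PySem.List.sorted (L.filter pvOk) (fun v => v) false).Perm (L.filter pvOk) :=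
      PySem.List.sorted_perm _ _ _
    have hSsort : (PySem.List.sorted (L.filter pvOk) (fun v => v) false).Pairwise (· ≤ ·) := by
      have := PySem.List.sorted_pairwise (L.filter pvOk) (fun v => v)
      simpa using this
    have hSne : PySem.List.sorted (L.filter pvOk) (fun v => v) false ≠ [] := by
      intro h
      exact hFnil ((PySem.List.sorted_eq_nil_iff _ _ _).1 h)
    obtain ⟨y0, hy0⟩ := List.exists_mem_of_ne_nil _ hSne
    have hcount : ∀ x, (PySem.List.sorted (L.filter pvOk) (fun v => v) false).count x
        = (L.filter pvOk).count x := fun x => hSperm.count_eq x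
    have hy0c : 0 < (PySem.List.sorted (L.filter pvOk) (fun v => v) false).count y0 :=
      List.count_pos_iff.2 hy0
    obtain ⟨_, IH2⟩ := pvRunMain (PySem.List.sorted (L.filter pvOk) (fun v => v) false).length
      _ le_rfl hSsort none 0 none 0 (by simp) le_rfl
    obtain ⟨w, hwS, hw1, _, _, hwmax, hwtie⟩ := IH2 y0 hy0 hy0c
    have hwF : w ∈ L.filter pvOk := hSperm.mem_iff.1 hwS
    -- A side
    have hitems := PySem.Dict.items_counter (L.filter pvOk)
    have hine : (PySem.Dict.counter (L.filter pvOk)).items ≠ [] := by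
      rw [hitems]
      intro h
      rw [List.map_eq_nil_iff] at h
      exact absurd (h ▸ (PySem.Set.mem_ofList (L.filter pvOk) w).2 hwF) (by simp)
    unfold pvRep
    rw [if_neg hine]
    obtain ⟨p, hp, hpmem, hple⟩ := pvMin2Spec _ hine
    rw [hp, Option.map_some, hw1]
    rw [hitems] at hpmem
    obtain ⟨kk, hkkS, hkkp⟩ := List.mem_map.1 hpmem
    have hkkF : kk ∈ L.filter pvOk := (PySem.Set.mem_ofList _ kk).1 hkkS
    have hkkSmem : kk ∈ PySem.List.sorted (L.filter pvOk) (fun v => v) false :=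
      hSperm.mem_iff.2 hkkF
    have hwitem : (w, ((L.filter pvOk).count w : Int))
        ∈ (PySem.Dict.counter (L.filter pvOk)).items := by
      rw [hitems]
      exact List.mem_map_of_mem ((PySem.Set.mem_ofList _ w).2 hwF)
    have h1 := hple _ hwitem
    rw [← hkkp] at h1
    unfold pvLe at h1
    simp only at h1
    have hmaxk : (L.filter pvOk).count kk ≤ (L.filter pvOk).count w := by
      have := hwmax kk hkkSmem
      rwa [hcount, hcount] at this
    have hkle : kk ≤ w ∧ (L.filter pvOk).count kk = (L.filter pvOk).count w := by
      rcases h1 with h | h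
      · exfalso; omega
      · exact ⟨h.2, by omega⟩
    have hwle : w ≤ kk := by
      apply hwtie kk hkkSmem
      rw [hcount, hcount]
      exact hkle.2
    have : w = kk := le_antisymm hwle hkle.1
    rw [this, ← hkkp]

-- ---- B reduced to the normal form ----
theorem pvFlatMapCongr {α β : Type} (l : List α) (f g : α → List β)
    (h : ∀ x ∈ l, f x = g x) : l.flatMap f = l.flatMap g := by
  induction l with
  | nil => rfl
  | cons a t ih =>
    simp only [List.flatMap_cons]
    rw [h a List.mem_cons_self, ih (fun x hx => h x (List.mem_cons_of_mem a hx))]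

theorem pvTailB (grid : List (List Int)) (m : Nat) (colors : List Int)
    (hrows' : ∀ row ∈ grid, m ≤ row.length) :
    (if colors = [] then grid.map (fun row => PySem.List.slice row none none)
     else grid.map (fun row => (PySem.List.slice row none (some ((m : Nat) : Int))).map (fun v =>
       if v ∈ colors then PySem.List.pyGetD colors
         (PySem.Int.mod ((((PySem.List.index? colors v).getD 0 : Nat) : Int) + 1)
           ((colors.length : Nat) : Int)) 0 else v)))
    = (if colors = [] then grid.map (fun row => PySem.List.slice row none none)
       else grid.map (fun row =>
         (List.range m).map (fun j : Nat => pvRecolor colors (row.getD j 0)))) := by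
  by_cases hcol : colors = []
  · rw [if_pos hcol, if_pos hcol]
  · rw [if_neg hcol, if_neg hcol]
    apply List.map_congr_left
    intro row hrow
    rw [PySem.List.slice_to_natCast, pvTakeEq row 0 m (hrows' row hrow), List.map_map]
    rfl

theorem transformB_eq (grid : List (List Int)) (hm : (grid.headD []).length ≠ 0)
    (hh : grid.length / 2 ≤ (grid.headD []).length)
    (hrows : ∀ row ∈ grid, (grid.headD []).length ≤ row.length) :
    transform_alt grid = pvCommon grid := by
  have hc := pvNotTrivial grid hm
  have hH : PySem.Int.floordiv (grid.length : Int) 2 = ((grid.length / 2 : Nat) : Int) := by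
    exact_mod_cast PySem.Int.floordiv_natCast grid.length 2
  have hrowlen : ∀ i, i < grid.length → (grid.headD []).length ≤ (grid.getD i []).length := by
    intro i hi
    rw [List.getD_eq_getElem grid [] hi]
    exact hrows _ (List.getElem_mem hi)
  have hhle : grid.length / 2 ≤ grid.length := Nat.div_le_self _ _
  have hTop : grid.take (grid.length / 2)
      = (List.range (grid.length / 2)).map (fun i => grid.getD i []) :=
    pvTakeEq grid [] _ hhle
  have hBot : grid.drop (grid.length / 2)
      = ((List.range (grid.length - grid.length / 2)).map (fun k => grid.length / 2 + k)).map
          (fun i => grid.getD i []) := by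
    rw [pvDropEq grid [] (grid.length / 2) hhle, List.map_map]
    rfl
  have hmemTop : ∀ i ∈ List.range (grid.length / 2), i < grid.length :=
    fun i hi => lt_of_lt_of_le (List.mem_range.1 hi) hhle
  have hmemBot : ∀ i ∈ (List.range (grid.length - grid.length / 2)).map
      (fun k => grid.length / 2 + k), i < grid.length := by
    intro i hi
    obtain ⟨k, hk, rfl⟩ := List.mem_map.1 hi
    have := List.mem_range.1 hk
    omega
  -- left columns: row.take h
  have hleft : ∀ i, i < grid.length →
      (grid.getD i []).take (grid.length / 2)
      = (List.range (grid.length / 2)).map (fun j => pvVal grid i j) := by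
    intro i hi
    rw [pvTakeEq (grid.getD i []) 0 (grid.length / 2) (le_trans hh (hrowlen i hi))]
    rfl
  -- right columns: (row.drop h).take (m - h)
  have hright : ∀ i, i < grid.length →
      List.take ((grid.headD []).length - grid.length / 2) ((grid.getD i []).drop (grid.length / 2))
      = (((List.range ((grid.headD []).length - grid.length / 2)).map
          (fun k => grid.length / 2 + k)).map (fun j => pvVal grid i j)) := by
    intro i hi
    rw [pvDropTakeEq (grid.getD i []) 0 (grid.length / 2)
      ((grid.headD []).length - grid.length / 2) (by have := hrowlen i hi; omega),
      List.map_map]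
    rfl
  have q1 : pvRepB ((PySem.List.slice grid none (some ((grid.length / 2 : Nat) : Int))).flatMap
        (fun row => PySem.List.slice row none (some ((grid.length / 2 : Nat) : Int))))
      = pvRep (PySem.Dict.counter (pvCellList grid (List.range (grid.length / 2))
          (List.range (grid.length / 2)))) := by
    rw [pvRepB_eq]
    unfold pvCellList
    simp only [PySem.List.slice_to_natCast]
    rw [hTop, List.flatMap_map]
    rw [pvFlatMapCongr _ _ _ (fun i hi => hleft i (hmemTop i hi))]
  have q2 : pvRepB ((PySem.List.slice grid none (some ((grid.length / 2 : Nat) : Int))).flatMap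
        (fun row => PySem.List.slice row (some ((grid.length / 2 : Nat) : Int))
          (some (((grid.headD []).length : Nat) : Int))))
      = pvRep (PySem.Dict.counter (pvCellList grid (List.range (grid.length / 2))
          ((List.range ((grid.headD []).length - grid.length / 2)).map
            (fun k => grid.length / 2 + k)))) := by
    rw [pvRepB_eq]
    unfold pvCellList
    simp only [PySem.List.slice_to_natCast, PySem.List.slice_natCast]
    rw [hTop, List.flatMap_map]
    rw [pvFlatMapCongr _ _ _ (fun i hi => hright i (hmemTop i hi))]
  have q3 : pvRepB ((PySem.List.slice grid (some ((grid.length / 2 : Nat) : Int)) none).flatMap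
        (fun row => PySem.List.slice row none (some ((grid.length / 2 : Nat) : Int))))
      = pvRep (PySem.Dict.counter (pvCellList grid
          ((List.range (grid.length - grid.length / 2)).map (fun k => grid.length / 2 + k))
          (List.range (grid.length / 2)))) := by
    rw [pvRepB_eq]
    unfold pvCellList
    simp only [PySem.List.slice_to_natCast, PySem.List.slice_from_natCast]
    rw [hBot, List.flatMap_map]
    rw [pvFlatMapCongr _ _ _ (fun i hi => hleft i (hmemBot i hi))]
  have q4 : pvRepB ((PySem.List.slice grid (some ((grid.length / 2 : Nat) : Int)) none).flatMap
        (fun row => PySem.List.slice row (some ((grid.length / 2 : Nat) : Int))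
          (some (((grid.headD []).length : Nat) : Int))))
      = pvRep (PySem.Dict.counter (pvCellList grid
          ((List.range (grid.length - grid.length / 2)).map (fun k => grid.length / 2 + k))
          ((List.range ((grid.headD []).length - grid.length / 2)).map
            (fun k => grid.length / 2 + k)))) := by
    rw [pvRepB_eq]
    unfold pvCellList
    simp only [PySem.List.slice_from_natCast, PySem.List.slice_natCast]
    rw [hBot, List.flatMap_map]
    rw [pvFlatMapCongr _ _ _ (fun i hi => hright i (hmemBot i hi))]
  simp only [transform_alt, if_neg hc, hH, q1, q2, q3, q4]
  simp only [pvCommon, if_neg hm]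
  exact pvTailB grid _ _ hrows

-- ===== VERDICT (by name: the statement is the Claim_ definition above) =====
theorem transform_spec : Claim_equal_transform := by
  intro grid _ hpre
  unfold Spec_transform
  by_cases hm : (grid.headD []).length = 0
  · have hc : (grid.length = 0 ∨ (grid.headD []).length = 0) := Or.inr hm
    unfold transform transform_alt
    rw [if_pos hc, if_pos hc]
  · have hpre' := hpre.resolve_left hm
    rw [transformA_eq grid hm hpre'.1, transformB_eq grid hm hpre'.1 hpre'.2]
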